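-- pv_equiv track=rewrite | github.com/GuoYi0/ChineseChessAlphaZero | guoyi3/environment/static_env.py | fliped_state
-- ===== SOURCE A (Python) =====
-- def fliped_state(state):
--     rows = state.split('/')
--
--     def _swapcase(a):
--         if a.isalpha():
--             return a.lower() if a.isupper() else a.upper()
--         return a
--
--     def _swapall(aa):
--         return "".join([_swapcase(a) for a in aa])
--
--     return "/".join([_swapall(reversed(row)) for row in reversed(rows)])
-- ===== SOURCE B (Python) =====
-- def fliped_state(state):
--     def _swapcase(a):
--         if a.isalpha():
--             return a.lower() if a.isupper() else a.upper()
--         return a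
--
--     return "".join(_swapcase(a) for a in reversed(state))
-- ===== Notes on version B (the rewrite author's own statement) =====
-- stated objective: simpler
-- what changed: B drops A's split-into-rows/reverse-row-list/reverse-each-row/rejoin decomposition and instead swapcases the characters of the whole reversed string in one pass, since the separator characters land back in the right positions.
import Mathlib
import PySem

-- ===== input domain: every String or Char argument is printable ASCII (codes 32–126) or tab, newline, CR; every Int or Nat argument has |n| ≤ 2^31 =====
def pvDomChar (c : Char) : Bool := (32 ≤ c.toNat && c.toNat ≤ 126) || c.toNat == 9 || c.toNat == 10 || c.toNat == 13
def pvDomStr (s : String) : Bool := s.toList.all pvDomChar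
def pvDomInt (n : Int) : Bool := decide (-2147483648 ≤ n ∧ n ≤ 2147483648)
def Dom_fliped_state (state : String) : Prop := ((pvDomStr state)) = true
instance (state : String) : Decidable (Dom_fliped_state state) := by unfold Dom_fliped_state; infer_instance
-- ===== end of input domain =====

-- B replaces A's split-on-'/'/reverse-rows/reverse-each-row/rejoin decomposition by a single
-- swapcase pass over the reversed whole string (objective: simpler).

-- ===== PORT A =====
-- _swapcase of A
def pvSwapcase (a : Char) : Char :=
  if PySem.Chars.isalpha a = true then
    (if PySem.Chars.isupper a = true then PySem.Chars.lowerChar a else PySem.Chars.upperChar a)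
  else a

-- _swapall of A: "".join of the per-char comprehension = the mapped char list as a string
def pvSwapall (aa : List Char) : String :=
  String.ofList (aa.map pvSwapcase)

def fliped_state (state : String) : String :=
  let rows := PySem.Chars.splitOn state.toList "/".toList
  PySem.Str.join "/" (rows.reverse.map (fun row => pvSwapall row.reverse))

-- ===== PORT B =====
def pvSwapcaseAlt (a : Char) : Char :=
  if PySem.Chars.isalpha a = true then
    (if PySem.Chars.isupper a = true then PySem.Chars.lowerChar a else PySem.Chars.upperChar a)
  else a

def fliped_state_alt (state : String) : String :=
  String.ofList (state.toList.reverse.map pvSwapcaseAlt)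

-- ===== PRECONDITION & SPEC =====
def Spec_fliped_state (state : String) (out : String) : Prop := out = fliped_state_alt state
instance (state : String) (out : String) : Decidable (Spec_fliped_state state out) := by unfold Spec_fliped_state; infer_instance

-- ===== CLAIM (what is proved, stated in full; the proofs are below) =====
def Claim_equal_fliped_state : Prop := ∀ (state : String), Dom_fliped_state state → Spec_fliped_state state (fliped_state state)

-- ===== LEMMAS AND PROOFS =====

-- intercalate over a nonempty-tail cons
theorem pv_ic_cons (c : Char) (a : List Char) (T : List (List Char)) (h : T ≠ []) :
    [c].intercalate (a :: T) = a ++ c :: [c].intercalate T := by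
  cases T with
  | nil => exact absurd rfl h
  | cons b t => simp [List.intercalate, List.intersperse]

theorem pv_ic_singleton (c : Char) (a : List Char) : [c].intercalate [a] = a := by
  simp [List.intercalate]

-- appending a last piece
theorem pv_ic_snoc (c : Char) (X : List (List Char)) (y : List Char) (h : X ≠ []) :
    [c].intercalate (X ++ [y]) = [c].intercalate X ++ c :: y := by
  induction X with
  | nil => exact absurd rfl h
  | cons x X ih =>
    cases X with
    | nil => simp [pv_ic_cons, pv_ic_singleton]
    | cons b t =>
      rw [List.cons_append, pv_ic_cons c x ((b :: t) ++ [y]) (by simp),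
          pv_ic_cons c x (b :: t) (by simp), ih (by simp)]
      simp

-- merging the last two pieces with the separator between them
theorem pv_ic_merge (c : Char) (X : List (List Char)) (u v : List Char) :
    [c].intercalate (X ++ [u, v]) = [c].intercalate (X ++ [u ++ c :: v]) := by
  induction X with
  | nil => simp [pv_ic_cons, pv_ic_singleton]
  | cons x X ih =>
    rw [List.cons_append, List.cons_append,
        pv_ic_cons c x (X ++ [u, v]) (by simp),
        pv_ic_cons c x (X ++ [u ++ c :: v]) (by simp), ih]

-- map over intercalate when the separator is a fixed point
theorem pv_ic_map (c : Char) (f : Char → Char) (hf : f c = c) :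
    ∀ P : List (List Char), (([c].intercalate P).map f) = [c].intercalate (P.map (List.map f)) := by
  intro P
  induction P with
  | nil => simp [List.intercalate]
  | cons a T ih =>
    cases T with
    | nil => simp [pv_ic_singleton]
    | cons b t =>
      rw [pv_ic_cons c a (b :: t) (by simp), List.map_cons,
          pv_ic_cons c (a.map f) ((b :: t).map (List.map f)) (by simp)]
      simp [ih, hf]

-- reversing an intercalate reverses the pieces and their order
theorem pv_ic_reverse (c : Char) :
    ∀ P : List (List Char), ([c].intercalate P).reverse = [c].intercalate (P.reverse.map List.reverse) := by
  intro P
  induction P with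
  | nil => simp [List.intercalate]
  | cons a T ih =>
    cases T with
    | nil => simp [pv_ic_singleton]
    | cons b t =>
      rw [pv_ic_cons c a (b :: t) (by simp)]
      have hne : ((b :: t).reverse.map List.reverse) ≠ [] := by simp
      rw [show (a :: b :: t).reverse.map List.reverse
            = ((b :: t).reverse.map List.reverse) ++ [a.reverse] by simp,
          pv_ic_snoc c _ _ hne, ← ih]
      simp

-- the accumulator invariant of PySem.Chars.splitOn.go for a one-char separator
theorem pv_go_ic (c : Char) (fuel : Nat) :
    ∀ (l cur : List Char) (acc : List (List Char)), l.length ≤ fuel →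
      [c].intercalate (PySem.Chars.splitOn.go [c] fuel l cur acc)
        = [c].intercalate (acc.reverse ++ [cur.reverse ++ l]) := by
  induction fuel with
  | zero =>
    intro l cur acc h
    have hl : l = [] := List.eq_nil_of_length_eq_zero (Nat.le_zero.mp h)
    subst hl
    simp [PySem.Chars.splitOn.go]
  | succ fuel ih =>
    intro l cur acc h
    cases l with
    | nil => simp [PySem.Chars.splitOn.go]
    | cons ch rest =>
      rw [show PySem.Chars.splitOn.go [c] (fuel + 1) (ch :: rest) cur acc
            = if [c].isPrefixOf (ch :: rest) = true
                then PySem.Chars.splitOn.go [c] fuel (List.drop [c].length (ch :: rest)) [] (cur.reverse :: acc)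
                else PySem.Chars.splitOn.go [c] fuel rest (ch :: cur) acc from rfl]
      by_cases hc : c = ch
      · subst hc
        simp only [List.isPrefixOf, BEq.rfl, Bool.true_and, if_true,
          List.length_cons, List.length_nil, List.drop_succ_cons, List.drop_zero]
        rw [ih rest [] (cur.reverse :: acc) (by simpa using Nat.le_of_succ_le_succ h)]
        rw [show (cur.reverse :: acc).reverse ++ [List.reverse [] ++ rest]
              = acc.reverse ++ [cur.reverse, rest] by simp]
        exact pv_ic_merge c acc.reverse cur.reverse rest
      · have hpre : [c].isPrefixOf (ch :: rest) = false := by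
          simp [List.isPrefixOf, hc]
        rw [hpre]
        simp only [if_false, Bool.false_eq_true]
        rw [ih rest (ch :: cur) acc (by simpa using Nat.le_of_succ_le_succ h)]
        simp

-- join after split is the identity
theorem pv_ic_splitOn (c : Char) (l : List Char) :
    [c].intercalate (PySem.Chars.splitOn l [c]) = l := by
  have := pv_go_ic c (l.length + 1) l [] [] (Nat.le_succ _)
  simpa [PySem.Chars.splitOn, pv_ic_singleton] using this

theorem pv_swap_eq : pvSwapcaseAlt = pvSwapcase := rfl

theorem pv_swap_slash : pvSwapcase '/' = '/' := by decide

-- ===== VERDICT (by name: the statement is the Claim_ definition above) =====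
theorem fliped_state_spec : Claim_equal_fliped_state := by
  intro state _
  unfold Spec_fliped_state fliped_state fliped_state_alt pvSwapall
  apply String.toList_inj.mp
  rw [PySem.Str.toList_join]
  have h1 : "/".toList = ['/'] := rfl
  rw [h1]
  have hjoin : PySem.Chars.join ['/']
      (List.map String.toList
        (List.map (fun row => String.ofList (row.reverse.map pvSwapcase))
          (PySem.Chars.splitOn state.toList ['/']).reverse))
      = ['/'].intercalate
        (((PySem.Chars.splitOn state.toList ['/']).reverse.map List.reverse).map
          (List.map pvSwapcase)) := by
    simp [PySem.Chars.join, List.map_map, Function.comp_def, String.toList_ofList]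
  rw [hjoin, ← pv_ic_map '/' pvSwapcase pv_swap_slash,
      ← pv_ic_reverse '/' (PySem.Chars.splitOn state.toList ['/']),
      pv_ic_splitOn '/' state.toList, pv_swap_eq, String.toList_ofList]
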